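-- pv_equiv track=rewrite | github.com/ggaem97/study | 2022-01-19/holdPaper2.py | is_holdingPaper
-- ===== SOURCE A (Python) =====
-- def is_holdingPaper(paper):
--     N = len(paper)
--     if N == 1:
--         return True
--     mid = N//2
--     for i in range(mid):
--         if paper[i] == paper[-i - 1]:
--             return False
--     return is_holdingPaper(paper[:mid])
-- ===== SOURCE B (Python) =====
-- def is_holdingPaper(paper):
--     n = len(paper)
--     while n > 1:
--         m = n // 2
--         for i in range(m):
--             if paper[i] == paper[n - 1 - i]:
--                 return False
--         n = m
--     return True
-- ===== Notes on version B (the rewrite author's own statement) =====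
-- stated objective: alternative
-- what changed: Replaces the tail recursion on sliced copies (paper[:mid]) with an iterative loop that only shrinks a length counter n and indexes the original list directly, so no sublist copies are made.
-- outside the precondition, e.g. on is_holdingPaper([]): A raises RecursionError, B returns True
import Mathlib
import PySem

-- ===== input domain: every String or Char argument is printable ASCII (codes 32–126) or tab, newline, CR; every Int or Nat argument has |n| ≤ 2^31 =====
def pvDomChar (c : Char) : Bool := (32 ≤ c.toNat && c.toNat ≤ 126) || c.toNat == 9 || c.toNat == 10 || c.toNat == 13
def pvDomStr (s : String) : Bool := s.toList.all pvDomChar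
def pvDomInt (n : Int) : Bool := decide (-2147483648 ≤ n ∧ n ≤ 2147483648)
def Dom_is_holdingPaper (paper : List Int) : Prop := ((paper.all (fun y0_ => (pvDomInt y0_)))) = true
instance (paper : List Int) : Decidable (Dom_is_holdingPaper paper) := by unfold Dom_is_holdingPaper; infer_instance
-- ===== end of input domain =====

-- B replaces A's tail recursion on sliced copies (paper[:mid]) by an iterative loop that
-- shrinks only a length counter and indexes the original list; equal return values on all
-- nonempty lists; on [] A raises RecursionError (excluded by Pre_), B returns True.

-- ===== PORT A =====
-- Literal port of A's recursion; the fuel parameter only makes the (on [] infinite)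
-- recursion total in Lean: it is never exhausted on Pre_ inputs.
def pvHoldA : Nat → List Int → Bool
  | 0, _ => false
  | fuel+1, paper =>
    let N := paper.length
    if N = 1 then true
    else
      let mid := N / 2
      -- for i in range(mid): if paper[i] == paper[-i - 1]: return False
      if (List.range mid).any (fun i =>
          PySem.List.pyGet? paper (i : Int) == PySem.List.pyGet? paper (-(i : Int) - 1)) then
        false
      else
        pvHoldA fuel (PySem.List.slice paper none (some (mid : Int)))

def is_holdingPaper (paper : List Int) : Bool := pvHoldA paper.length paper

-- ===== PORT B =====
-- while n > 1: scan paper[i] vs paper[n-1-i] for i < n//2, then n := n//2.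
-- The fuel parameter only makes the loop structural for Lean; it is never exhausted
-- before the loop exits (fuel = initial n bounds the number of halvings), and on
-- exhaustion it returns the loop's exit value true.
def pvHoldB (paper : List Int) : Nat → Nat → Bool
  | 0, _ => true
  | fuel+1, n =>
    if 1 < n then
      let m := n / 2
      if (List.range m).any (fun i =>
          PySem.List.pyGet? paper (i : Int) == PySem.List.pyGet? paper ((n : Int) - 1 - i)) then
        false
      else
        pvHoldB paper fuel m
    else true

def is_holdingPaper_alt (paper : List Int) : Bool := pvHoldB paper paper.length paper.length

-- ===== PRECONDITION & SPEC =====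
-- On [] the Python A recurses on paper[:0] = [] forever and raises RecursionError.
def Pre_is_holdingPaper (paper : List Int) : Prop := paper ≠ []
instance (paper : List Int) : Decidable (Pre_is_holdingPaper paper) := by
  unfold Pre_is_holdingPaper; infer_instance

def pvWitness_is_holdingPaper : List Int := [1, 2]

def Spec_is_holdingPaper (paper : List Int) (out : Bool) : Prop := out = is_holdingPaper_alt paper
instance (paper : List Int) (out : Bool) : Decidable (Spec_is_holdingPaper paper out) := by
  unfold Spec_is_holdingPaper; infer_instance

-- ===== CLAIM (what is proved, stated in full; the proofs are below) =====
def Claim_equal_is_holdingPaper : Prop := ∀ (paper : List Int), Dom_is_holdingPaper paper → Pre_is_holdingPaper paper → Spec_is_holdingPaper paper (is_holdingPaper paper)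

-- ===== LEMMAS AND PROOFS =====

-- For i < n the pair read on the current prefix 'paper.take n' (with the negative
-- index) equals the pair read on the original list with explicit indices.
theorem pvPair_eq (paper : List Int) (n : Nat) (hn : n ≤ paper.length) (i : Nat) (hi : i < n) :
    PySem.List.pyGet? (paper.take n) (i : Int) = PySem.List.pyGet? paper (i : Int) ∧
    PySem.List.pyGet? (paper.take n) (-(i : Int) - 1) =
      PySem.List.pyGet? paper ((n : Int) - 1 - i) := by
  have hlen : (paper.take n).length = n := by simp [List.length_take]; omega
  constructor
  · rw [PySem.List.pyGet?_natCast, PySem.List.pyGet?_natCast]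
    rw [List.getElem?_take_of_lt (by omega)]
  · have hcast : (-(i : Int) - 1) = -(((i + 1 : Nat) : Int)) := by push_cast; ring
    rw [hcast, PySem.List.pyGet?_neg_natCast _ _ (by omega) (by omega)]
    have hcast2 : ((n : Int) - 1 - i) = ((n - 1 - i : Nat) : Int) := by omega
    rw [hcast2, PySem.List.pyGet?_natCast, hlen]
    rw [List.getElem?_take_of_lt (by omega)]
    congr 1
    omega

-- A level's scan over the current prefix equals B's scan over the original list.
theorem pvScan_eq (paper : List Int) (n : Nat) (hn : n ≤ paper.length) (m : Nat) (hm : m ≤ n) :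
    (List.range m).any (fun i =>
        PySem.List.pyGet? (paper.take n) (i : Int) ==
          PySem.List.pyGet? (paper.take n) (-(i : Int) - 1)) =
    (List.range m).any (fun i =>
        PySem.List.pyGet? paper (i : Int) == PySem.List.pyGet? paper ((n : Int) - 1 - i)) := by
  induction m with
  | zero => simp
  | succ m ih =>
    rw [List.range_succ, List.any_append, List.any_append, ih (by omega)]
    obtain ⟨h1, h2⟩ := pvPair_eq paper n hn m (by omega)
    simp only [List.any_cons, List.any_nil, Bool.or_false, h1, h2]

-- Loop invariant: A run on the current prefix equals B run with the length counter.
theorem pvHold_eq (paper : List Int) (fuel n : Nat) (h1 : 1 ≤ n) (h2 : n ≤ paper.length)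
    (hf : n ≤ fuel) : pvHoldA fuel (paper.take n) = pvHoldB paper fuel n := by
  induction fuel generalizing n with
  | zero => omega
  | succ fuel ih =>
    rw [pvHoldA, pvHoldB]
    have hlen : (paper.take n).length = n := by simp [List.length_take]; omega
    simp only [hlen]
    by_cases hone : n = 1
    · simp [hone]
    · rw [if_neg hone, if_pos (show 1 < n by omega)]
      rw [pvScan_eq paper n h2 (n / 2) (by omega)]
      cases hc : (List.range (n / 2)).any (fun i =>
          PySem.List.pyGet? paper (i : Int) == PySem.List.pyGet? paper ((n : Int) - 1 - i)) with
      | true => simp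
      | false =>
        simp only [if_false, Bool.false_eq_true]
        rw [PySem.List.slice_to_natCast, List.take_take]
        have hmin : min (n / 2) n = n / 2 := by omega
        rw [hmin]
        exact ih (n / 2) (by omega) (by omega) (by omega)

-- ===== VERDICT (by name: the statement is the Claim_ definition above) =====
theorem is_holdingPaper_spec : Claim_equal_is_holdingPaper := by
  intro paper _ hpre
  unfold Spec_is_holdingPaper is_holdingPaper is_holdingPaper_alt
  have hlen : 1 ≤ paper.length := by
    cases paper with
    | nil => exact absurd rfl hpre
    | cons a l => simp
  have := pvHold_eq paper paper.length paper.length hlen le_rfl le_rfl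
  rwa [List.take_length] at this
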